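-- pv_equiv track=rewrite | github.com/TarasKindrat/SoftServe_Python-online-marathon | 9_sprint/main.py | check_id_users_from_list
-- ===== SOURCE A (Python) =====
-- USERS_LIST = [
--     {
--         "id": 1,
--         "username": "theUser",
--         "firstName": "John",
--         "lastName": "James",
--         "email": "john@email.com",
--         "password": "12345",
--     }
-- ]
--
-- def check_id_users_from_list(data_list):
--     flag = True
--     for data in data_list:
--         for user in USERS_LIST:
--             if data.get("id") == user.get("id"):
--                 flag = False
--                 break
--     return flag
-- ===== SOURCE B (Python) =====
-- USERS_LIST = [
--     {
--         "id": 1,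
--         "username": "theUser",
--         "firstName": "John",
--         "lastName": "James",
--         "email": "john@email.com",
--         "password": "12345",
--     }
-- ]
--
-- def check_id_users_from_list(data_list):
--     user_ids = {u.get("id") for u in USERS_LIST}
--     data_ids = {d.get("id") for d in data_list}
--     return data_ids.isdisjoint(user_ids)
-- ===== Notes on version B (the rewrite author's own statement) =====
-- stated objective: idiomatic
-- what changed: Replaces the nested flag-mutating loops with building the set of user ids and the set of data ids once and returning a single set-disjointness check.
import Mathlib
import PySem

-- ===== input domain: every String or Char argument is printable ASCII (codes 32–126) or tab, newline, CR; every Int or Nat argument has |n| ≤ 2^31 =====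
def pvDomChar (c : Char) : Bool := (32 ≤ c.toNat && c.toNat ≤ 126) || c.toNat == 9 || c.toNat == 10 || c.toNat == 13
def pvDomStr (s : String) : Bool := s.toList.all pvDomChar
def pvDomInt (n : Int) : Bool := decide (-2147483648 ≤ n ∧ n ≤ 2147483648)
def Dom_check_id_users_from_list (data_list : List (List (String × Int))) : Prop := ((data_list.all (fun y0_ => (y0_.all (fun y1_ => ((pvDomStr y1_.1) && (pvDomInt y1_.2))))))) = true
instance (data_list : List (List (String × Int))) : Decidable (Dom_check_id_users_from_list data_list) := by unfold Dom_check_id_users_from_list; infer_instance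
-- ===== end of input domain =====

-- B replaces A's nested flag-mutating loops with two id-sets built up front and one set-disjointness check (more idiomatic).


-- ===== PORT A =====
def pvUsersList : List (List (String × Int)) := [[("id", 1)]]
-- USERS_LIST: only the "id" entry is representable under the Int value type and only
-- it is ever read (data.get("id") == user.get("id")), so the constant carries just that entry.

-- inner 'for user in USERS_LIST' loop with its break and flag
def pvScanUsers (data : List (String × Int)) (users : List (List (String × Int))) (flag : Bool) : Bool :=
  match users with
  | [] => flag
  | user :: rest =>
    if (PySem.Dict.mk data).get? "id" == (PySem.Dict.mk user).get? "id" then false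
    else pvScanUsers data rest flag

def check_id_users_from_list (data_list : List (List (String × Int))) : Bool :=
  data_list.foldl (fun flag data => pvScanUsers data pvUsersList flag) true

-- ===== PORT B =====
def check_id_users_from_list_alt (data_list : List (List (String × Int))) : Bool :=
  let userIds : PySem.Set (Option Int) :=
    PySem.Set.ofList (pvUsersList.map (fun u => (PySem.Dict.mk u).get? "id"))
  let dataIds : PySem.Set (Option Int) :=
    PySem.Set.ofList (data_list.map (fun d => (PySem.Dict.mk d).get? "id"))
  PySem.Set.isdisjoint dataIds userIds

-- ===== PRECONDITION & SPEC =====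
def Spec_check_id_users_from_list (data_list : List (List (String × Int))) (out : Bool) : Prop := out = check_id_users_from_list_alt data_list
instance (data_list : List (List (String × Int))) (out : Bool) : Decidable (Spec_check_id_users_from_list data_list out) := by unfold Spec_check_id_users_from_list; infer_instance

-- ===== CLAIM (what is proved, stated in full; the proofs are below) =====
def Claim_equal_check_id_users_from_list : Prop := ∀ (data_list : List (List (String × Int))), Dom_check_id_users_from_list data_list → Spec_check_id_users_from_list data_list (check_id_users_from_list data_list)

-- ===== LEMMAS AND PROOFS =====

-- ===== VERDICT (by name: the statement is the Claim_ definition above) =====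
-- A's value characterised: true iff no data dict's "id" is 1
theorem pvScanUsers_eq (data : List (String × Int)) (flag : Bool) :
    pvScanUsers data pvUsersList flag
      = (flag && !((PySem.Dict.mk data).get? "id" == some 1)) := by
  simp only [pvUsersList, pvScanUsers]
  have h : (PySem.Dict.mk [("id", (1 : Int))]).get? "id" = some 1 := rfl
  rw [h]
  by_cases hc : (PySem.Dict.mk data).get? "id" = some 1 <;> simp [hc]

theorem pvFoldA (data_list : List (List (String × Int))) (flag : Bool) :
    data_list.foldl (fun flag data => pvScanUsers data pvUsersList flag) flag
      = (flag && data_list.all (fun d => !((PySem.Dict.mk d).get? "id" == some 1))) := by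
  induction data_list generalizing flag with
  | nil => simp
  | cons d rest ih =>
    rw [List.foldl_cons, pvScanUsers_eq, ih, List.all_cons, Bool.and_assoc]

theorem pvA_eq_all (data_list : List (List (String × Int))) :
    check_id_users_from_list data_list
      = data_list.all (fun d => !((PySem.Dict.mk d).get? "id" == some 1)) := by
  simp [check_id_users_from_list, pvFoldA]

theorem pvB_eq_all (data_list : List (List (String × Int))) :
    check_id_users_from_list_alt data_list
      = data_list.all (fun d => !((PySem.Dict.mk d).get? "id" == some 1)) := by
  rw [Bool.eq_iff_iff]
  simp only [check_id_users_from_list_alt]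
  rw [PySem.Set.isdisjoint_iff]
  simp [PySem.Set.mem_ofList, pvUsersList, List.all_eq_true]
  rfl

theorem check_id_users_from_list_spec : Claim_equal_check_id_users_from_list := by
  intro dl _
  unfold Spec_check_id_users_from_list
  rw [pvA_eq_all, pvB_eq_all]
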